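-- pv_equiv track=rewrite | github.com/greglever/big-search | profilers/boyer_moore.py | fundamental_preprocess
-- ===== SOURCE A (Python) =====
-- def match_length(S, idx1, idx2):
--     """
--     Returns the length of the match of the substrings of S beginning at idx1 and idx2.
--     """
--     if idx1 == idx2:
--         return len(S) - idx1
--     match_count = 0
--     while idx1 < len(S) and idx2 < len(S) and S[idx1] == S[idx2]:
--         match_count += 1
--         idx1 += 1
--         idx2 += 1
--     return match_count
--
-- def fundamental_preprocess(S):
--     """
--     Returns Z, the Fundamental Preprocessing of S. Z[i] is the length of the substring
--     beginning at i which is also a prefix of S. This pre-processing is done in O(n) time,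
--     where n is the length of S.
--     """
--     if len(S) == 0: # Handles case of empty string
--         return []
--     if len(S) == 1: # Handles case of single-character string
--         return [1]
--     z = [0 for x in S]
--     z[0] = len(S)
--     z[1] = match_length(S, 0, 1)
--     for i in range(2, 1+z[1]): # Optimization from exercise 1-5
--         z[i] = z[1]-i+1
--     # Defines lower and upper limits of z-box
--     l = 0
--     r = 0
--     for i in range(2+z[1], len(S)):
--         if i <= r: # i falls within existing z-box
--             k = i-l
--             b = z[k]
--             a = r-i+1
--             if b < a: # b ends within existing z-box
--                 z[i] = b
--             else: # b ends at or after the end of the z-box, we need to do an explicit match to the right of the z-box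
--                 z[i] = a+match_length(S, a, r+1)
--                 l = i
--                 r = i+z[i]-1
--         else: # i does not reside within existing z-box
--             z[i] = match_length(S, 0, i)
--             if z[i] > 0:
--                 l = i
--                 r = i+z[i]-1
--     return z
-- ===== SOURCE B (Python) =====
-- def lcp_len(xs, ys):
--     """Length of the longest common prefix of xs and ys, by a direct scan."""
--     k = 0
--     for a, b in zip(xs, ys):
--         if a != b:
--             break
--         k += 1
--     return k
--
-- def fundamental_preprocess(S):
--     """Z-array of S computed naively: z[0] = len(S), z[i] = lcp(S, S[i:])."""
--     n = len(S)
--     if n == 0: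
--         return []
--     if n == 1:
--         return [1]
--     return [n] + [lcp_len(S, S[i:]) for i in range(1, n)]
-- ===== Notes on version B (the rewrite author's own statement) =====
-- stated objective: simpler
-- what changed: Replaced the single-pass z-box (l/r window) algorithm by the naive definition: z[0]=len(S) and z[i] is computed by a direct longest-common-prefix scan of S against S[i:] for each i, with no maintained window or copied values.
import Mathlib
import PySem

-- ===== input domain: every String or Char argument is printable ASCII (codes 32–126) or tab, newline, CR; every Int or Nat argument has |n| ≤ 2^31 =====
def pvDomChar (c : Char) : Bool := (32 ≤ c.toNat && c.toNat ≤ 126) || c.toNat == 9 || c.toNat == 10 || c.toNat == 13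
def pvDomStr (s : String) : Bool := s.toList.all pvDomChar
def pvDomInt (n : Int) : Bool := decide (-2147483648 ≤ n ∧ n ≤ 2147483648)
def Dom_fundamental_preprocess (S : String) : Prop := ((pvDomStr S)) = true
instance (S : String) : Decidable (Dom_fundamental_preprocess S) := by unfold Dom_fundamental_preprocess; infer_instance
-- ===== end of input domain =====

-- B replaces A's single-pass z-box algorithm by the naive per-index longest-common-prefix
-- scan (simpler, not faster); both return the Z-array with z[0] = len(S).


-- ===== PORT A =====
-- while idx1 < len(S) and idx2 < len(S) and S[idx1] == S[idx2]: … (the while loop of match_length)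
def matchLenWhile (cs : List Char) (i1 i2 : Nat) : Nat :=
  if h : i1 < cs.length ∧ i2 < cs.length ∧ cs.getD i1 ' ' = cs.getD i2 ' ' then
    1 + matchLenWhile cs (i1 + 1) (i2 + 1)
  else 0
termination_by cs.length - i2
decreasing_by omega

-- match_length(S, idx1, idx2); all of A's call sites have idx1 ≤ len(S), where Nat subtraction is exact
def match_lengthA (cs : List Char) (i1 i2 : Nat) : Nat :=
  if i1 = i2 then cs.length - i1 else matchLenWhile cs i1 i2

-- one iteration of A's main for-loop (state: the z array and the z-box bounds l, r)
def fpStep (cs : List Char) (st : List Nat × Nat × Nat) (i : Nat) : List Nat × Nat × Nat :=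
  let z := st.1; let l := st.2.1; let r := st.2.2
  if i ≤ r then
    let k := i - l
    let b := z.getD k 0
    let a := r - i + 1
    if b < a then (z.set i b, l, r)
    else
      let zi := a + match_lengthA cs a (r + 1)
      (z.set i zi, i, i + zi - 1)
  else
    let zi := match_lengthA cs 0 i
    if zi > 0 then (z.set i zi, i, i + zi - 1)
    else (z.set i zi, l, r)

def fundamental_preprocess (S : String) : List Int :=
  let cs := S.toList
  let n := cs.length
  if n = 0 then []
  else if n = 1 then [1]
  else
    let z1 := match_lengthA cs 0 1
    let z := ((List.replicate n 0).set 0 n).set 1 z1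
    let z := (List.range' 2 (1 + z1 - 2)).foldl (fun z i => z.set i (z1 - i + 1)) z
    ((List.range' (2 + z1) (n - (2 + z1))).foldl (fpStep cs) (z, 0, 0)).1.map
      (fun (v : Nat) => (v : Int))

-- ===== PORT B =====
-- lcp_len(xs, ys): scan the zipped pair lists while the characters agree
def lcpLen : List Char → List Char → Nat
  | a :: xs, b :: ys => if a = b then lcpLen xs ys + 1 else 0
  | _, _ => 0

def fundamental_preprocess_alt (S : String) : List Int :=
  let cs := S.toList
  let n := cs.length
  if n = 0 then []
  else if n = 1 then [1]
  else (n : Int) :: (List.range' 1 (n - 1)).map (fun i => (lcpLen cs (cs.drop i) : Int))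

-- ===== PRECONDITION & SPEC =====
def Spec_fundamental_preprocess (S : String) (out : List Int) : Prop := out = fundamental_preprocess_alt S
instance (S : String) (out : List Int) : Decidable (Spec_fundamental_preprocess S out) := by unfold Spec_fundamental_preprocess; infer_instance

-- ===== CLAIM (what is proved, stated in full; the proofs are below) =====
def Claim_equal_fundamental_preprocess : Prop := ∀ (S : String), Dom_fundamental_preprocess S → Spec_fundamental_preprocess S (fundamental_preprocess S)

-- ===== LEMMAS AND PROOFS =====

-- abbreviation used only in the proofs: the true Z-value at index i
def Zv (cs : List Char) (i : Nat) : Nat := lcpLen cs (cs.drop i)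

theorem lcpLen_nil_right (xs : List Char) : lcpLen xs [] = 0 := by
  cases xs <;> rfl

theorem lcpLen_nil_left (ys : List Char) : lcpLen [] ys = 0 := by
  cases ys <;> rfl

theorem lcpLen_le_left : ∀ xs ys : List Char, lcpLen xs ys ≤ xs.length := by
  intro xs; induction xs with
  | nil => intro ys; cases ys <;> simp [lcpLen]
  | cons a xs ih =>
    intro ys; cases ys with
    | nil => simp [lcpLen_nil_right]
    | cons b ys =>
      by_cases h : a = b <;> simp [lcpLen, h]
      exact ih ys

theorem lcpLen_le_right : ∀ xs ys : List Char, lcpLen xs ys ≤ ys.length := by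
  intro xs; induction xs with
  | nil => intro ys; cases ys <;> simp [lcpLen]
  | cons a xs ih =>
    intro ys; cases ys with
    | nil => simp [lcpLen_nil_right]
    | cons b ys =>
      by_cases h : a = b <;> simp [lcpLen, h]
      exact ih ys

theorem lcpLen_self : ∀ xs : List Char, lcpLen xs xs = xs.length := by
  intro xs; induction xs with
  | nil => rfl
  | cons a xs ih => simp [lcpLen, ih]

theorem lcpLen_take_eq : ∀ xs ys : List Char,
    xs.take (lcpLen xs ys) = ys.take (lcpLen xs ys) := by
  intro xs; induction xs with
  | nil => intro ys; cases ys <;> simp [lcpLen]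
  | cons a xs ih =>
    intro ys; cases ys with
    | nil => simp [lcpLen_nil_right]
    | cons b ys =>
      by_cases h : a = b <;> simp [lcpLen, h]
      exact ih ys

theorem take_eq_of_le_lcpLen {m : Nat} {xs ys : List Char}
    (h : m ≤ lcpLen xs ys) : xs.take m = ys.take m := by
  have := congrArg (List.take m) (lcpLen_take_eq xs ys)
  simpa [List.take_take, Nat.min_eq_left h] using this

theorem lcpLen_ge : ∀ (m : Nat) (xs ys : List Char),
    m ≤ xs.length → xs.take m = ys.take m → m ≤ lcpLen xs ys := by
  intro m; induction m with
  | zero => intro xs ys _ _; exact Nat.zero_le _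
  | succ m ih =>
    intro xs ys hlen htake
    cases xs with
    | nil => simp at hlen
    | cons a xs =>
      cases ys with
      | nil => simp at htake
      | cons b ys =>
        simp [List.take_succ_cons] at htake
        obtain ⟨rfl, htake⟩ := htake
        simp [lcpLen]
        exact ih xs ys (by simpa using hlen) htake

theorem lcpLen_le_of_ne : ∀ (m : Nat) (xs ys : List Char) (d : Char),
    m < xs.length → m < ys.length → xs.getD m d ≠ ys.getD m d →
    lcpLen xs ys ≤ m := by
  intro m; induction m with
  | zero =>
    intro xs ys d h1 h2 hne
    cases xs with
    | nil => simp at h1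
    | cons a xs =>
      cases ys with
      | nil => simp at h2
      | cons b ys =>
        simp [List.getD_cons_zero] at hne
        simp [lcpLen, hne]
  | succ m ih =>
    intro xs ys d h1 h2 hne
    cases xs with
    | nil => simp at h1
    | cons a xs =>
      cases ys with
      | nil => simp at h2
      | cons b ys =>
        by_cases h : a = b
        · simp [lcpLen, h]
          have := ih xs ys d (by simpa using h1) (by simpa using h2)
            (by simpa [List.getD_cons_succ] using hne)
          omega
        · simp [lcpLen, h]

-- uniqueness: a common prefix of length m with a stop at m pins lcpLen to m
theorem lcpLen_eq_of (m : Nat) (xs ys : List Char) (d : Char)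
    (htake : xs.take m = ys.take m)
    (hstop : xs.length = m ∨ ys.length = m ∨
      (m < xs.length ∧ m < ys.length ∧ xs.getD m d ≠ ys.getD m d)) :
    lcpLen xs ys = m := by
  rcases hstop with h | h | ⟨h1, h2, h3⟩
  · have hge : m ≤ lcpLen xs ys := lcpLen_ge m xs ys (le_of_eq h.symm) htake
    have := lcpLen_le_left xs ys
    omega
  · have hylen : m ≤ ys.length := le_of_eq h.symm
    have hxlen : m ≤ xs.length := by
      have := congrArg List.length htake
      simp at this
      omega
    have hge : m ≤ lcpLen xs ys := lcpLen_ge m xs ys hxlen htake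
    have := lcpLen_le_right xs ys
    omega
  · have hge : m ≤ lcpLen xs ys := lcpLen_ge m xs ys (le_of_lt h1) htake
    have hle := lcpLen_le_of_ne m xs ys d h1 h2 h3
    omega

-- lcpLen capped at a depends only on the first a characters of an argument
theorem lcpLen_min_congr : ∀ (a : Nat) (zs xs ys : List Char),
    xs.take a = ys.take a →
    min (lcpLen zs xs) a = min (lcpLen zs ys) a := by
  intro a; induction a with
  | zero => intro zs xs ys _; simp
  | succ a ih =>
    intro zs xs ys htake
    cases xs with
    | nil =>
      cases ys with
      | nil => rfl
      | cons b ys => simp at htake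
    | cons x xs =>
      cases ys with
      | nil => simp at htake
      | cons y ys =>
        simp [List.take_succ_cons] at htake
        obtain ⟨rfl, htake⟩ := htake
        cases zs with
        | nil => simp [lcpLen]
        | cons z zs =>
          by_cases h : z = x
          · simp [lcpLen, h, Nat.succ_min_succ]
            exact ih zs xs ys htake
          · simp [lcpLen, h]

theorem lcpLen_drop_decomp : ∀ (a : Nat) (xs ys : List Char),
    a ≤ lcpLen xs ys →
    lcpLen xs ys = a + lcpLen (xs.drop a) (ys.drop a) := by
  intro a; induction a with
  | zero => intro xs ys _; simp
  | succ a ih =>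
    intro xs ys h
    cases xs with
    | nil => simp [lcpLen] at h
    | cons x xs =>
      cases ys with
      | nil => simp [lcpLen_nil_right] at h
      | cons y ys =>
        by_cases hxy : x = y
        · simp [lcpLen, hxy] at h ⊢
          have := ih xs ys (by omega)
          omega
        · simp [lcpLen, hxy] at h

theorem lcpLen_getD_ne : ∀ (xs ys : List Char) (d : Char),
    lcpLen xs ys < xs.length → lcpLen xs ys < ys.length →
    xs.getD (lcpLen xs ys) d ≠ ys.getD (lcpLen xs ys) d := by
  intro xs
  induction xs with
  | nil => intro ys d h1 _; simp [lcpLen] at h1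
  | cons a xs ih =>
    intro ys d h1 h2
    cases ys with
    | nil => simp [lcpLen_nil_right] at h2
    | cons b ys =>
      by_cases h : a = b
      · simp [lcpLen, h] at h1 h2 ⊢
        exact ih ys d h1 h2
      · simpa [lcpLen, h] using h

theorem matchLenWhile_eq (cs : List Char) (i1 i2 : Nat) :
    matchLenWhile cs i1 i2 = lcpLen (cs.drop i1) (cs.drop i2) := by
  induction i1, i2 using matchLenWhile.induct cs with
  | case1 i1 i2 h ih =>
    obtain ⟨h1, h2, heq⟩ := h
    rw [matchLenWhile]
    rw [dif_pos ⟨h1, h2, heq⟩, ih]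
    rw [List.drop_eq_getElem_cons h1, List.drop_eq_getElem_cons h2]
    rw [List.getD_eq_getElem cs ' ' h1, List.getD_eq_getElem cs ' ' h2] at heq
    simp [lcpLen, heq]
    omega
  | case2 i1 i2 h =>
    rw [matchLenWhile, dif_neg h]
    push_neg at h
    by_cases hl1 : i1 < cs.length
    · by_cases hl2 : i2 < cs.length
      · have hne := h hl1 hl2
        rw [List.drop_eq_getElem_cons hl1, List.drop_eq_getElem_cons hl2]
        rw [List.getD_eq_getElem cs ' ' hl1, List.getD_eq_getElem cs ' ' hl2] at hne
        simp [lcpLen, hne]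
      · rw [show cs.drop i2 = [] from List.drop_eq_nil_of_le (by omega), lcpLen_nil_right]
    · rw [show cs.drop i1 = [] from List.drop_eq_nil_of_le (by omega), lcpLen_nil_left]

theorem match_lengthA_eq (cs : List Char) (i1 i2 : Nat) (h : i1 ≤ cs.length) :
    match_lengthA cs i1 i2 = lcpLen (cs.drop i1) (cs.drop i2) := by
  unfold match_lengthA
  split
  · rename_i heq; subst heq
    rw [lcpLen_self, List.length_drop]
  · exact matchLenWhile_eq cs i1 i2

-- getD through drop, take-prefix equality, and set (helpers for index bookkeeping)
theorem getD_drop (xs : List Char) (i t : Nat) (d : Char) :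
    (xs.drop i).getD t d = xs.getD (i + t) d := by
  simp [List.getD_eq_getElem?_getD, List.getElem?_drop]

theorem getD_of_take_eq {xs ys : List Char} {m t : Nat} (d : Char)
    (h : xs.take m = ys.take m) (ht : t < m) (hx : t < xs.length) :
    xs.getD t d = ys.getD t d := by
  have hy : t < ys.length := by
    have := congrArg List.length h
    simp at this
    omega
  have h1 : t < (xs.take m).length := by simp; omega
  have h2 : t < (ys.take m).length := by simp; omega
  have heq : (xs.take m).getD t d = (ys.take m).getD t d := by rw [h]
  rw [List.getD_eq_getElem _ _ h1, List.getD_eq_getElem _ _ h2,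
    List.getElem_take, List.getElem_take] at heq
  rw [List.getD_eq_getElem _ _ hx, List.getD_eq_getElem _ _ hy]
  exact heq

theorem getD_set' (z : List Nat) (i j v : Nat) :
    (z.set i v).getD j 0 = if i = j ∧ i < z.length then v else z.getD j 0 := by
  by_cases hij : i = j
  · subst hij
    by_cases hi : i < z.length
    · simp [List.getD_eq_getElem?_getD, List.getElem?_set, hi]
    · have hnone : z[i]? = none := by
        rw [List.getElem?_eq_none_iff]; omega
      simp [List.getD_eq_getElem?_getD, List.getElem?_set, hi, hnone]
  · simp [List.getD_eq_getElem?_getD, List.getElem?_set_ne hij, hij]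

-- ==== the run of equal characters at the front (A's "exercise 1-5" fill) ====

-- the true Z value (proof-only abbreviation)
-- (defined above the lemmas that use it; Zv cs i = lcpLen cs (cs.drop i))

theorem run_all_eq (cs : List Char) (d : Char) :
    ∀ j, j ≤ Zv cs 1 → j < cs.length → cs.getD j d = cs.getD 0 d := by
  intro j
  induction j with
  | zero => intro _ _; rfl
  | succ t ih =>
    intro hj hlt
    have htake : cs.take (Zv cs 1) = (cs.drop 1).take (Zv cs 1) :=
      lcpLen_take_eq cs (cs.drop 1)
    have hstep : cs.getD t d = (cs.drop 1).getD t d :=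
      getD_of_take_eq d htake (by omega) (by omega)
    rw [getD_drop] at hstep
    have : cs.getD (1 + t) d = cs.getD 0 d := by
      rw [← hstep]; exact ih (by omega) (by omega)
    simpa [Nat.add_comm] using this

theorem run_mismatch (cs : List Char) (d : Char) (h : Zv cs 1 + 1 < cs.length) :
    cs.getD (Zv cs 1) d ≠ cs.getD (Zv cs 1 + 1) d := by
  have h1 : Zv cs 1 < cs.length := by omega
  have h2 : Zv cs 1 < (cs.drop 1).length := by simp; omega
  have h3 : cs.getD (Zv cs 1) d ≠ (cs.drop 1).getD (Zv cs 1) d :=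
    lcpLen_getD_ne cs (cs.drop 1) d h1 h2
  have h4 : (cs.drop 1).getD (Zv cs 1) d = cs.getD (1 + Zv cs 1) d := getD_drop cs 1 (Zv cs 1) d
  rw [Nat.add_comm] at h4
  intro hc
  exact h3 (by rw [hc, ← h4])

theorem Zv_le (cs : List Char) (i : Nat) : Zv cs i ≤ cs.length - i := by
  have := lcpLen_le_right cs (cs.drop i)
  simpa [Zv] using this

theorem Zv_in_run (cs : List Char) (hn : 1 ≤ cs.length) {i : Nat}
    (h1 : 1 ≤ i) (hik : i ≤ Zv cs 1) : Zv cs i = Zv cs 1 - i + 1 := by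
  have hk : Zv cs 1 ≤ cs.length - 1 := Zv_le cs 1
  have main : lcpLen cs (cs.drop i) = Zv cs 1 - i + 1 := by
    apply lcpLen_eq_of (Zv cs 1 - i + 1) cs (cs.drop i) ' '
    · apply List.ext_getElem
      · simp; omega
      · intro t h1t h2t
        simp at h1t h2t
        rw [List.getElem_take, List.getElem_take, List.getElem_drop]
        have ha : t < cs.length := by omega
        have hb : i + t < cs.length := by omega
        have g1 : cs.getD t ' ' = cs.getD 0 ' ' :=
          run_all_eq cs ' ' t (by omega) (by omega)
        have g2 : cs.getD (i + t) ' ' = cs.getD 0 ' ' :=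
          run_all_eq cs ' ' (i + t) (by omega) (by omega)
        rw [List.getD_eq_getElem _ _ ha] at g1
        rw [List.getD_eq_getElem _ _ hb] at g2
        rw [g1, g2]
    · by_cases hend : Zv cs 1 + 1 = cs.length
      · right; left; simp; omega
      · right; right
        refine ⟨by omega, by simp; omega, ?_⟩
        rw [getD_drop]
        have g1 : cs.getD (Zv cs 1 - i + 1) ' ' = cs.getD 0 ' ' :=
          run_all_eq cs ' ' _ (by omega) (by omega)
        have g2 : cs.getD (Zv cs 1) ' ' = cs.getD 0 ' ' :=
          run_all_eq cs ' ' _ (by omega) (by omega)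
        have hmis := run_mismatch cs ' ' (by omega)
        rw [g2] at hmis
        rw [g1, show i + (Zv cs 1 - i + 1) = Zv cs 1 + 1 by omega]
        exact hmis
  exact main

theorem Zv_after_run (cs : List Char) (hk : 1 ≤ Zv cs 1)
    (hlt : Zv cs 1 + 1 < cs.length) : Zv cs (Zv cs 1 + 1) = 0 := by
  have main : lcpLen cs (cs.drop (Zv cs 1 + 1)) = 0 := by
    apply lcpLen_eq_of 0 cs (cs.drop (Zv cs 1 + 1)) ' '
    · simp
    · right; right
      refine ⟨by omega, by simp; omega, ?_⟩
      rw [getD_drop, Nat.add_zero]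
      have g2 : cs.getD (Zv cs 1) ' ' = cs.getD 0 ' ' :=
        run_all_eq cs ' ' _ (by omega) (by omega)
      have hmis := run_mismatch cs ' ' hlt
      rw [g2] at hmis
      exact hmis
  exact main

-- ==== the z-box copy/extension argument ====

theorem Zv_box (cs : List Char) (l k i r a : Nat)
    (hik : i = l + k) (hbox : r + 1 ≤ l + Zv cs l) (hra : r + 1 = i + a) :
    min (Zv cs i) a = min (Zv cs k) a := by
  have hka : k + a ≤ Zv cs l := by omega
  have htake : cs.take (k + a) = (cs.drop l).take (k + a) :=
    take_eq_of_le_lcpLen hka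
  have h2 : (cs.drop k).take a = (cs.drop i).take a := by
    have h3 := congrArg (List.drop k) htake
    rw [List.drop_take, List.drop_take, List.drop_drop, Nat.add_sub_cancel_left] at h3
    rw [show l + k = i by omega] at h3
    exact h3
  exact (lcpLen_min_congr a cs (cs.drop k) (cs.drop i) h2).symm

-- ==== the loop invariants of A's main pass ====

def ZProp (cs : List Char) (i : Nat) (z : List Nat) : Prop :=
  z.length = cs.length ∧ z.getD 0 0 = cs.length ∧
  ∀ j, 1 ≤ j → j < i → j < cs.length → z.getD j 0 = Zv cs j

def BoxProp (cs : List Char) (i l r : Nat) : Prop :=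
  (l = 0 ∧ r = 0) ∨ (1 ≤ l ∧ l < i ∧ r + 1 ≤ l + Zv cs l)

theorem fpStep_inv (cs : List Char) (z : List Nat) (l r i : Nat)
    (h2 : 2 ≤ i) (hin : i < cs.length) (hz : ZProp cs i z) (hb : BoxProp cs i l r) :
    ZProp cs (i + 1) (fpStep cs (z, l, r) i).1 ∧
    BoxProp cs (i + 1) (fpStep cs (z, l, r) i).2.1 (fpStep cs (z, l, r) i).2.2 := by
  obtain ⟨hlen, h0, hj⟩ := hz
  have hizlen : i < z.length := by omega
  by_cases hir : i ≤ r
  · -- inside the z-box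
    rcases hb with ⟨rfl, rfl⟩ | ⟨hl1, hli, hbr⟩
    · omega
    have hZl : Zv cs l ≤ cs.length - l := Zv_le cs l
    have hrn : r + 1 ≤ cs.length := by omega
    have hk1 : 1 ≤ i - l := by omega
    have hki : i - l < i := by omega
    have hbval : z.getD (i - l) 0 = Zv cs (i - l) := hj (i - l) hk1 hki (by omega)
    have hmin := Zv_box cs l (i - l) i r (r - i + 1) (by omega) hbr (by omega)
    by_cases hba : z.getD (i - l) 0 < r - i + 1
    · -- copy case
      have hZi : Zv cs i = z.getD (i - l) 0 := by
        rw [hbval] at hba ⊢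
        rw [Nat.min_def, Nat.min_def] at hmin
        split_ifs at hmin <;> omega
      simp only [fpStep, if_pos hir, if_pos hba]
      refine ⟨⟨by simpa using hlen, ?_, ?_⟩, Or.inr ⟨hl1, by omega, hbr⟩⟩
      · rw [getD_set', if_neg (by omega)]; exact h0
      · intro j hj1 hji hjn
        rw [getD_set']
        by_cases hji' : i = j
        · subst hji'; rw [if_pos ⟨rfl, hizlen⟩, hZi]
        · rw [if_neg (by omega)]; exact hj j hj1 (by omega) hjn
    · -- extension case
      have haZk : r - i + 1 ≤ Zv cs (i - l) := by omega
      have haZi : r - i + 1 ≤ Zv cs i := by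
        rw [Nat.min_def, Nat.min_def] at hmin
        split_ifs at hmin <;> omega
      have hdec := lcpLen_drop_decomp (r - i + 1) cs (cs.drop i) haZi
      have hzi : r - i + 1 + match_lengthA cs (r - i + 1) (r + 1) = Zv cs i := by
        rw [match_lengthA_eq cs (r - i + 1) (r + 1) (by omega)]
        rw [List.drop_drop] at hdec
        rw [show i + (r - i + 1) = r + 1 by omega] at hdec
        exact hdec.symm
      simp only [fpStep, if_pos hir, if_neg hba]
      refine ⟨⟨by simpa using hlen, ?_, ?_⟩, Or.inr ⟨by omega, by omega, ?_⟩⟩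
      · rw [getD_set', if_neg (by omega)]; exact h0
      · intro j hj1 hji hjn
        rw [getD_set']
        by_cases hji' : i = j
        · subst hji'; rw [if_pos ⟨rfl, hizlen⟩, hzi]
        · rw [if_neg (by omega)]; exact hj j hj1 (by omega) hjn
      · rw [hzi]; omega
  · -- outside the z-box
    have hzi : match_lengthA cs 0 i = Zv cs i := by
      rw [match_lengthA_eq cs 0 i (by omega)]
      simp [Zv]
    have hznew : ZProp cs (i + 1) (z.set i (match_lengthA cs 0 i)) := by
      refine ⟨by simpa using hlen, ?_, ?_⟩
      · rw [getD_set', if_neg (by omega)]; exact h0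
      · intro j hj1 hji hjn
        rw [getD_set']
        by_cases hji' : i = j
        · subst hji'; rw [if_pos ⟨rfl, hizlen⟩, hzi]
        · rw [if_neg (by omega)]; exact hj j hj1 (by omega) hjn
    by_cases hpos : match_lengthA cs 0 i > 0
    · simp only [fpStep, if_neg hir, if_pos hpos]
      refine ⟨hznew, Or.inr ⟨by omega, by omega, ?_⟩⟩
      rw [show i + match_lengthA cs 0 i - 1 + 1 = i + match_lengthA cs 0 i by omega, hzi]
    · simp only [fpStep, if_neg hir, if_neg hpos]
      refine ⟨hznew, ?_⟩
      rcases hb with ⟨rfl, rfl⟩ | ⟨hl1, hli, hbr⟩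
      · exact Or.inl ⟨rfl, rfl⟩
      · exact Or.inr ⟨hl1, by omega, hbr⟩

theorem fold_inv (cs : List Char) : ∀ (c i : Nat) (z : List Nat) (l r : Nat),
    2 ≤ i → i + c = cs.length → ZProp cs i z → BoxProp cs i l r →
    ZProp cs cs.length ((List.range' i c).foldl (fpStep cs) (z, l, r)).1 := by
  intro c
  induction c with
  | zero =>
    intro i z l r h2 hic hz hb
    simpa using (hic ▸ hz)
  | succ c ih =>
    intro i z l r h2 hic hz hb
    rw [List.range'_succ, List.foldl_cons]
    have hstep := fpStep_inv cs z l r i h2 (by omega) hz hb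
    rcases hst : fpStep cs (z, l, r) i with ⟨z', l', r'⟩
    rw [hst] at hstep
    exact ih (i + 1) z' l' r' (by omega) (by omega) hstep.1 hstep.2

-- ==== the prefix fill (A's exercise 1-5 loop) ====

theorem prefix_fold_len (z1 : Nat) : ∀ (c s : Nat) (z : List Nat),
    ((List.range' s c).foldl (fun z i => z.set i (z1 - i + 1)) z).length = z.length := by
  intro c
  induction c with
  | zero => intro s z; simp
  | succ c ih =>
    intro s z
    rw [List.range'_succ, List.foldl_cons, ih]
    simp

theorem prefix_fold_getD (z1 : Nat) : ∀ (c s : Nat) (z : List Nat) (j : Nat),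
    ((List.range' s c).foldl (fun z i => z.set i (z1 - i + 1)) z).getD j 0 =
      if s ≤ j ∧ j < s + c ∧ j < z.length then z1 - j + 1 else z.getD j 0 := by
  intro c
  induction c with
  | zero =>
    intro s z j
    rw [if_neg (by omega)]
    simp
  | succ c ih =>
    intro s z j
    rw [List.range'_succ, List.foldl_cons, ih]
    simp only [List.length_set]
    rw [getD_set']
    by_cases hA : s + 1 ≤ j ∧ j < s + 1 + c ∧ j < z.length
    · rw [if_pos hA, if_pos (by omega)]
    · rw [if_neg hA]
      by_cases hB : s = j ∧ s < z.length
      · obtain ⟨rfl, hsl⟩ := hB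
        rw [if_pos ⟨rfl, hsl⟩, if_pos (by omega)]
      · rw [if_neg hB, if_neg (by omega)]

-- ==== assembling the whole algorithm ====

theorem main_core (cs : List Char) (hn2 : 2 ≤ cs.length) :
    ((List.range' (2 + match_lengthA cs 0 1) (cs.length - (2 + match_lengthA cs 0 1))).foldl
        (fpStep cs)
        ((List.range' 2 (1 + match_lengthA cs 0 1 - 2)).foldl
          (fun z i => z.set i (match_lengthA cs 0 1 - i + 1))
          (((List.replicate cs.length 0).set 0 cs.length).set 1 (match_lengthA cs 0 1)), 0, 0)).1.map
      (fun (v : Nat) => (v : Int)) =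
    (cs.length : Int) :: (List.range' 1 (cs.length - 1)).map (fun i => (lcpLen cs (cs.drop i) : Int)) := by
  have hz1 : match_lengthA cs 0 1 = Zv cs 1 := by
    rw [match_lengthA_eq cs 0 1 (by omega)]
    simp [Zv]
  have hk : Zv cs 1 ≤ cs.length - 1 := Zv_le cs 1
  set z1 := match_lengthA cs 0 1 with hz1def
  set zinit := ((List.replicate cs.length 0).set 0 cs.length).set 1 z1 with hzinit
  have hinitlen : zinit.length = cs.length := by simp [hzinit]
  have hinit : ∀ j, zinit.getD j 0 =
      if j = 0 then cs.length else if j = 1 then z1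
      else (List.replicate cs.length (0 : Nat)).getD j 0 := by
    intro j
    rw [hzinit, getD_set', getD_set']
    simp only [List.length_set, List.length_replicate]
    by_cases hj1 : j = 1
    · subst hj1; rw [if_pos ⟨rfl, by omega⟩]; simp
    · rw [if_neg (by omega)]
      by_cases hj0 : j = 0
      · subst hj0; rw [if_pos ⟨rfl, by omega⟩]; simp
      · rw [if_neg (by omega)]; simp [hj0, hj1]
  set zp := (List.range' 2 (1 + z1 - 2)).foldl (fun z i => z.set i (z1 - i + 1)) zinit with hzp
  have hplen : zp.length = cs.length := by rw [hzp, prefix_fold_len, hinitlen]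
  have hpget : ∀ j, zp.getD j 0 =
      if 2 ≤ j ∧ j < 2 + (1 + z1 - 2) ∧ j < cs.length then z1 - j + 1
      else zinit.getD j 0 := by
    intro j
    rw [hzp, prefix_fold_getD, hinitlen]
  have hZP : ZProp cs (2 + z1) zp := by
    refine ⟨hplen, ?_, ?_⟩
    · rw [hpget, if_neg (by omega), hinit]; simp
    · intro j hj1 hji hjn
      by_cases hjone : j = 1
      · subst hjone
        rw [hpget, if_neg (by omega), hinit]
        rw [if_neg (by omega), if_pos rfl, hz1]
      · have hj2 : 2 ≤ j := by omega
        by_cases hjrun : j ≤ z1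
        · rw [hpget, if_pos ⟨hj2, by omega, hjn⟩]
          rw [Zv_in_run cs (by omega) (by omega) (by omega), hz1]
        · -- index z1+1: left untouched (zero) by A; Zv is 0 there
          have hjz : j = z1 + 1 := by omega
          rw [hpget, if_neg (by omega), hinit, if_neg (by omega), if_neg (by omega)]
          have hrep : (List.replicate cs.length (0 : Nat)).getD j 0 = 0 :=
            List.getD_replicate 0 (by omega)
          rw [hrep, hjz, hz1, Zv_after_run cs (by omega) (by omega)]
  have hfin : ZProp cs cs.length
      ((List.range' (2 + z1) (cs.length - (2 + z1))).foldl (fpStep cs) (zp, 0, 0)).1 := by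
    by_cases hle : 2 + z1 ≤ cs.length
    · exact fold_inv cs (cs.length - (2 + z1)) (2 + z1) zp 0 0 (by omega) (by omega)
        hZP (Or.inl ⟨rfl, rfl⟩)
    · rw [show cs.length - (2 + z1) = 0 by omega]
      simp only [List.range'_zero, List.foldl_nil]
      obtain ⟨ha, hb, hc⟩ := hZP
      exact ⟨ha, hb, fun j hj1 hji hjn => hc j hj1 (by omega) hjn⟩
  obtain ⟨hflen, hf0, hfj⟩ := hfin
  apply List.ext_getElem
  · simp [hflen]; omega
  · intro j hj1 hj2
    rcases j with _ | t
    · have h01 := hf0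
      rw [List.getD_eq_getElem _ _ (by omega)] at h01
      rw [List.getElem_map, List.getElem_cons_zero, h01]
    · have hjlen : t + 1 < cs.length := by
        simp [hflen] at hj1
        omega
      have hval := hfj (t + 1) (by omega) (by omega) hjlen
      rw [List.getD_eq_getElem _ _ (by omega)] at hval
      rw [List.getElem_map, hval, List.getElem_cons_succ, List.getElem_map,
        List.getElem_range']
      simp [Zv, Nat.add_comm]

-- ===== VERDICT (by name: the statement is the Claim_ definition above) =====
theorem fundamental_preprocess_spec : Claim_equal_fundamental_preprocess := by
  unfold Claim_equal_fundamental_preprocess Spec_fundamental_preprocess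
  intro S _
  unfold fundamental_preprocess fundamental_preprocess_alt
  by_cases h0 : S.toList.length = 0
  · simp [h0]
  by_cases h1 : S.toList.length = 1
  · simp [h1]
  simp only [h0, h1, if_false]
  exact main_core S.toList (by omega)
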